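-- pv_equiv track=rewrite | github.com/AmirrezaFarnamTaheri/StreamlineVPN | Legacy/src/massconfigmerger/result_processor.py | categorize_protocol
-- ===== SOURCE A (Python) =====
-- def categorize_protocol(config: str) -> str:
--     """Categorize configuration by protocol.
--
--     Matching is case-insensitive so schemes like ``VMESS://`` work the same
--     as ``vmess://``.
--     """
--     protocol_map = {
--         "vmess://": "VMess",
--         "vless://": "VLESS",
--         "ss://": "Shadowsocks",
--         "ssr://": "ShadowsocksR",
--         "trojan://": "Trojan",
--         "hy2://": "Hysteria2",
--         "hysteria2://": "Hysteria2",
--         "hysteria://": "Hysteria",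
--         "tuic://": "TUIC",
--         "reality://": "Reality",
--         "naive://": "Naive",
--         "juicity://": "Juicity",
--         "wireguard://": "WireGuard",
--         "shadowtls://": "ShadowTLS",
--         "brook://": "Brook",
--     }
--     config_lower = config.lower()
--     for prefix, protocol in protocol_map.items():
--         if config_lower.startswith(prefix):
--             return protocol
--     return "Other"
-- ===== SOURCE B (Python) =====
-- def categorize_protocol(config: str) -> str:
--     """Categorize configuration by protocol (case-insensitive)."""
--     scheme_map = {
--         "vmess": "VMess",
--         "vless": "VLESS",
--         "ss": "Shadowsocks",
--         "ssr": "ShadowsocksR",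
--         "trojan": "Trojan",
--         "hy2": "Hysteria2",
--         "hysteria2": "Hysteria2",
--         "hysteria": "Hysteria",
--         "tuic": "TUIC",
--         "reality": "Reality",
--         "naive": "Naive",
--         "juicity": "Juicity",
--         "wireguard": "WireGuard",
--         "shadowtls": "ShadowTLS",
--         "brook": "Brook",
--     }
--     head, sep, _ = config.lower().partition("://")
--     if not sep:
--         return "Other"
--     return scheme_map.get(head, "Other")
-- ===== Notes on version B (the rewrite author's own statement) =====
-- stated objective: simpler
-- what changed: Replaces the ordered scan of 15 startswith prefix tests with parsing the scheme off once (partition on '://') followed by a single dict lookup keyed on bare scheme names.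
import Mathlib
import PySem

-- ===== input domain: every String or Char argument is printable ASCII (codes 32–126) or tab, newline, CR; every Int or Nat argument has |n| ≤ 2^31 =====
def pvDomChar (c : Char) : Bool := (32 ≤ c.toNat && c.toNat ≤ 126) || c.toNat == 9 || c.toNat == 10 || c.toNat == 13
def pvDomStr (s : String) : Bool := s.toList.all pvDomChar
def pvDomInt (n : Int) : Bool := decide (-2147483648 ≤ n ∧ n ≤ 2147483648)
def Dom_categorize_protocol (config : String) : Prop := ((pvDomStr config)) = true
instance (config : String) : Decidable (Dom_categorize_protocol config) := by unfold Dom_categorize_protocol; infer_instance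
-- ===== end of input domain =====

-- B parses the scheme once (partition on "://") and does a single map lookup instead of A's ordered scan of 15 startswith tests; objective: simpler.


-- ===== PORT A =====
def categorize_protocol (config : String) : String :=
  let cl := PySem.Str.lower config
  if PySem.Str.startswith cl "vmess://" then "VMess"
  else if PySem.Str.startswith cl "vless://" then "VLESS"
  else if PySem.Str.startswith cl "ss://" then "Shadowsocks"
  else if PySem.Str.startswith cl "ssr://" then "ShadowsocksR"
  else if PySem.Str.startswith cl "trojan://" then "Trojan"
  else if PySem.Str.startswith cl "hy2://" then "Hysteria2"
  else if PySem.Str.startswith cl "hysteria2://" then "Hysteria2"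
  else if PySem.Str.startswith cl "hysteria://" then "Hysteria"
  else if PySem.Str.startswith cl "tuic://" then "TUIC"
  else if PySem.Str.startswith cl "reality://" then "Reality"
  else if PySem.Str.startswith cl "naive://" then "Naive"
  else if PySem.Str.startswith cl "juicity://" then "Juicity"
  else if PySem.Str.startswith cl "wireguard://" then "WireGuard"
  else if PySem.Str.startswith cl "shadowtls://" then "ShadowTLS"
  else if PySem.Str.startswith cl "brook://" then "Brook"
  else "Other"

-- ===== PORT B =====
-- scheme_map: the Python dict keyed on bare scheme names
def pvSchemeMap : PySem.Dict String String :=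
  PySem.Dict.mk
  [("vmess", "VMess"), ("vless", "VLESS"), ("ss", "Shadowsocks"), ("ssr", "ShadowsocksR"), ("trojan", "Trojan"), ("hy2", "Hysteria2"), ("hysteria2", "Hysteria2"), ("hysteria", "Hysteria"), ("tuic", "TUIC"), ("reality", "Reality"), ("naive", "Naive"), ("juicity", "Juicity"), ("wireguard", "WireGuard"), ("shadowtls", "ShadowTLS"), ("brook", "Brook")]

-- head of config_lower.partition("://"): some head (text before the FIRST "://") when the
-- separator occurs, none when it is absent (Python's `sep == ""` test). Exact for str.partition.
def pvPartitionHead : List Char → Option (List Char)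
  | [] => none
  | c :: cs =>
    if (c :: cs).take 3 = [':', '/', '/'] then some []
    else (pvPartitionHead cs).map (fun h => c :: h)

def categorize_protocol_alt (config : String) : String :=
  match pvPartitionHead (PySem.Str.lower config).toList with
  | none => "Other"
  | some h => PySem.Dict.getD pvSchemeMap (String.ofList h) "Other"

-- ===== PRECONDITION & SPEC =====
def Spec_categorize_protocol (config : String) (out : String) : Prop := out = categorize_protocol_alt config
instance (config : String) (out : String) : Decidable (Spec_categorize_protocol config out) := by unfold Spec_categorize_protocol; infer_instance

-- ===== CLAIM (what is proved, stated in full; the proofs are below) =====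
def Claim_equal_categorize_protocol : Prop := ∀ (config : String), Dom_categorize_protocol config → Spec_categorize_protocol config (categorize_protocol config)

-- ===== LEMMAS AND PROOFS =====

-- soundness of the parse: a returned head is really followed by "://" in the input
theorem pvPartitionHead_sound (l h : List Char) (hp : pvPartitionHead l = some h) :
    ∃ t, l = h ++ [':', '/', '/'] ++ t := by
  induction l generalizing h with
  | nil => simp [pvPartitionHead] at hp
  | cons c cs ih =>
    rw [pvPartitionHead] at hp
    split at hp
    next hsep =>
      have hh : h = [] := by simpa using hp.symm
      subst hh
      rcases cs with _ | ⟨x, _ | ⟨y, t⟩⟩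
      · simp at hsep
      · simp at hsep
      · obtain ⟨rfl, rfl, rfl⟩ : c = ':' ∧ x = '/' ∧ y = '/' := by simpa using hsep
        exact ⟨t, by simp⟩
    next =>
      simp only [Option.map_eq_some_iff] at hp
      obtain ⟨h', hp', rfl⟩ := hp
      obtain ⟨t, rfl⟩ := ih h' hp'
      exact ⟨t, by simp⟩

set_option maxHeartbeats 1000000 in
theorem categorize_protocol_spec : Claim_equal_categorize_protocol := by
  intro config _
  unfold Spec_categorize_protocol categorize_protocol
  dsimp only
  cases h1 : PySem.Str.startswith (PySem.Str.lower config) "vmess://" with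
  | true =>
    rw [if_pos rfl]
    have hp : ("vmess://".toList) <+: PySem.Chars.lower config.toList := by
      simpa only [pysem] using h1
    obtain ⟨rest, hres⟩ := hp
    rw [show ("vmess://".toList) = ['v','m','e','s','s',':','/','/'] from rfl] at hres
    rw [categorize_protocol_alt]
    simp only [pysem]
    rw [← hres]
    simp [pvPartitionHead]
    all_goals decide
  | false =>
    rw [if_neg Bool.false_ne_true]
    cases h2 : PySem.Str.startswith (PySem.Str.lower config) "vless://" with
    | true =>
      rw [if_pos rfl]
      have hp : ("vless://".toList) <+: PySem.Chars.lower config.toList := by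
        simpa only [pysem] using h2
      obtain ⟨rest, hres⟩ := hp
      rw [show ("vless://".toList) = ['v','l','e','s','s',':','/','/'] from rfl] at hres
      rw [categorize_protocol_alt]
      simp only [pysem]
      rw [← hres]
      simp [pvPartitionHead]
      all_goals decide
    | false =>
      rw [if_neg Bool.false_ne_true]
      cases h3 : PySem.Str.startswith (PySem.Str.lower config) "ss://" with
      | true =>
        rw [if_pos rfl]
        have hp : ("ss://".toList) <+: PySem.Chars.lower config.toList := by
          simpa only [pysem] using h3
        obtain ⟨rest, hres⟩ := hp
        rw [show ("ss://".toList) = ['s','s',':','/','/'] from rfl] at hres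
        rw [categorize_protocol_alt]
        simp only [pysem]
        rw [← hres]
        simp [pvPartitionHead]
        all_goals decide
      | false =>
        rw [if_neg Bool.false_ne_true]
        cases h4 : PySem.Str.startswith (PySem.Str.lower config) "ssr://" with
        | true =>
          rw [if_pos rfl]
          have hp : ("ssr://".toList) <+: PySem.Chars.lower config.toList := by
            simpa only [pysem] using h4
          obtain ⟨rest, hres⟩ := hp
          rw [show ("ssr://".toList) = ['s','s','r',':','/','/'] from rfl] at hres
          rw [categorize_protocol_alt]
          simp only [pysem]
          rw [← hres]
          simp [pvPartitionHead]
          all_goals decide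
        | false =>
          rw [if_neg Bool.false_ne_true]
          cases h5 : PySem.Str.startswith (PySem.Str.lower config) "trojan://" with
          | true =>
            rw [if_pos rfl]
            have hp : ("trojan://".toList) <+: PySem.Chars.lower config.toList := by
              simpa only [pysem] using h5
            obtain ⟨rest, hres⟩ := hp
            rw [show ("trojan://".toList) = ['t','r','o','j','a','n',':','/','/'] from rfl] at hres
            rw [categorize_protocol_alt]
            simp only [pysem]
            rw [← hres]
            simp [pvPartitionHead]
            all_goals decide
          | false =>
            rw [if_neg Bool.false_ne_true]
            cases h6 : PySem.Str.startswith (PySem.Str.lower config) "hy2://" with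
            | true =>
              rw [if_pos rfl]
              have hp : ("hy2://".toList) <+: PySem.Chars.lower config.toList := by
                simpa only [pysem] using h6
              obtain ⟨rest, hres⟩ := hp
              rw [show ("hy2://".toList) = ['h','y','2',':','/','/'] from rfl] at hres
              rw [categorize_protocol_alt]
              simp only [pysem]
              rw [← hres]
              simp [pvPartitionHead]
              all_goals decide
            | false =>
              rw [if_neg Bool.false_ne_true]
              cases h7 : PySem.Str.startswith (PySem.Str.lower config) "hysteria2://" with
              | true =>
                rw [if_pos rfl]
                have hp : ("hysteria2://".toList) <+: PySem.Chars.lower config.toList := by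
                  simpa only [pysem] using h7
                obtain ⟨rest, hres⟩ := hp
                rw [show ("hysteria2://".toList) = ['h','y','s','t','e','r','i','a','2',':','/','/'] from rfl] at hres
                rw [categorize_protocol_alt]
                simp only [pysem]
                rw [← hres]
                simp [pvPartitionHead]
                all_goals decide
              | false =>
                rw [if_neg Bool.false_ne_true]
                cases h8 : PySem.Str.startswith (PySem.Str.lower config) "hysteria://" with
                | true =>
                  rw [if_pos rfl]
                  have hp : ("hysteria://".toList) <+: PySem.Chars.lower config.toList := by
                    simpa only [pysem] using h8
                  obtain ⟨rest, hres⟩ := hp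
                  rw [show ("hysteria://".toList) = ['h','y','s','t','e','r','i','a',':','/','/'] from rfl] at hres
                  rw [categorize_protocol_alt]
                  simp only [pysem]
                  rw [← hres]
                  simp [pvPartitionHead]
                  all_goals decide
                | false =>
                  rw [if_neg Bool.false_ne_true]
                  cases h9 : PySem.Str.startswith (PySem.Str.lower config) "tuic://" with
                  | true =>
                    rw [if_pos rfl]
                    have hp : ("tuic://".toList) <+: PySem.Chars.lower config.toList := by
                      simpa only [pysem] using h9
                    obtain ⟨rest, hres⟩ := hp
                    rw [show ("tuic://".toList) = ['t','u','i','c',':','/','/'] from rfl] at hres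
                    rw [categorize_protocol_alt]
                    simp only [pysem]
                    rw [← hres]
                    simp [pvPartitionHead]
                    all_goals decide
                  | false =>
                    rw [if_neg Bool.false_ne_true]
                    cases h10 : PySem.Str.startswith (PySem.Str.lower config) "reality://" with
                    | true =>
                      rw [if_pos rfl]
                      have hp : ("reality://".toList) <+: PySem.Chars.lower config.toList := by
                        simpa only [pysem] using h10
                      obtain ⟨rest, hres⟩ := hp
                      rw [show ("reality://".toList) = ['r','e','a','l','i','t','y',':','/','/'] from rfl] at hres
                      rw [categorize_protocol_alt]
                      simp only [pysem]
                      rw [← hres]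
                      simp [pvPartitionHead]
                      all_goals decide
                    | false =>
                      rw [if_neg Bool.false_ne_true]
                      cases h11 : PySem.Str.startswith (PySem.Str.lower config) "naive://" with
                      | true =>
                        rw [if_pos rfl]
                        have hp : ("naive://".toList) <+: PySem.Chars.lower config.toList := by
                          simpa only [pysem] using h11
                        obtain ⟨rest, hres⟩ := hp
                        rw [show ("naive://".toList) = ['n','a','i','v','e',':','/','/'] from rfl] at hres
                        rw [categorize_protocol_alt]
                        simp only [pysem]
                        rw [← hres]
                        simp [pvPartitionHead]
                        all_goals decide
                      | false =>
                        rw [if_neg Bool.false_ne_true]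
                        cases h12 : PySem.Str.startswith (PySem.Str.lower config) "juicity://" with
                        | true =>
                          rw [if_pos rfl]
                          have hp : ("juicity://".toList) <+: PySem.Chars.lower config.toList := by
                            simpa only [pysem] using h12
                          obtain ⟨rest, hres⟩ := hp
                          rw [show ("juicity://".toList) = ['j','u','i','c','i','t','y',':','/','/'] from rfl] at hres
                          rw [categorize_protocol_alt]
                          simp only [pysem]
                          rw [← hres]
                          simp [pvPartitionHead]
                          all_goals decide
                        | false =>
                          rw [if_neg Bool.false_ne_true]
                          cases h13 : PySem.Str.startswith (PySem.Str.lower config) "wireguard://" with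
                          | true =>
                            rw [if_pos rfl]
                            have hp : ("wireguard://".toList) <+: PySem.Chars.lower config.toList := by
                              simpa only [pysem] using h13
                            obtain ⟨rest, hres⟩ := hp
                            rw [show ("wireguard://".toList) = ['w','i','r','e','g','u','a','r','d',':','/','/'] from rfl] at hres
                            rw [categorize_protocol_alt]
                            simp only [pysem]
                            rw [← hres]
                            simp [pvPartitionHead]
                            all_goals decide
                          | false =>
                            rw [if_neg Bool.false_ne_true]
                            cases h14 : PySem.Str.startswith (PySem.Str.lower config) "shadowtls://" with
                            | true =>
                              rw [if_pos rfl]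
                              have hp : ("shadowtls://".toList) <+: PySem.Chars.lower config.toList := by
                                simpa only [pysem] using h14
                              obtain ⟨rest, hres⟩ := hp
                              rw [show ("shadowtls://".toList) = ['s','h','a','d','o','w','t','l','s',':','/','/'] from rfl] at hres
                              rw [categorize_protocol_alt]
                              simp only [pysem]
                              rw [← hres]
                              simp [pvPartitionHead]
                              all_goals decide
                            | false =>
                              rw [if_neg Bool.false_ne_true]
                              cases h15 : PySem.Str.startswith (PySem.Str.lower config) "brook://" with
                              | true =>
                                rw [if_pos rfl]
                                have hp : ("brook://".toList) <+: PySem.Chars.lower config.toList := by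
                                  simpa only [pysem] using h15
                                obtain ⟨rest, hres⟩ := hp
                                rw [show ("brook://".toList) = ['b','r','o','o','k',':','/','/'] from rfl] at hres
                                rw [categorize_protocol_alt]
                                simp only [pysem]
                                rw [← hres]
                                simp [pvPartitionHead]
                                all_goals decide
                              | false =>
                                rw [if_neg Bool.false_ne_true]
                                rw [categorize_protocol_alt]
                                simp only [pysem]
                                cases hp : pvPartitionHead (PySem.Chars.lower config.toList) with
                                | none => rfl
                                | some h =>
                                  obtain ⟨t, hlt⟩ := pvPartitionHead_sound _ _ hp
                                  have n1 : ("vmess" == String.ofList h) = false := by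
                                    simp only [beq_eq_false_iff_ne]; intro he
                                    have hch : h = ['v','m','e','s','s'] := by simpa using congrArg String.toList he.symm
                                    have hpre : ("vmess://".toList) <+: PySem.Chars.lower config.toList := ⟨t, by simp [hch, hlt]⟩
                                    simp only [pysem] at h1
                                    rw [(PySem.Chars.startswith_iff _ _).mpr hpre] at h1
                                    cases h1
                                  have n2 : ("vless" == String.ofList h) = false := by
                                    simp only [beq_eq_false_iff_ne]; intro he
                                    have hch : h = ['v','l','e','s','s'] := by simpa using congrArg String.toList he.symm
                                    have hpre : ("vless://".toList) <+: PySem.Chars.lower config.toList := ⟨t, by simp [hch, hlt]⟩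
                                    simp only [pysem] at h2
                                    rw [(PySem.Chars.startswith_iff _ _).mpr hpre] at h2
                                    cases h2
                                  have n3 : ("ss" == String.ofList h) = false := by
                                    simp only [beq_eq_false_iff_ne]; intro he
                                    have hch : h = ['s','s'] := by simpa using congrArg String.toList he.symm
                                    have hpre : ("ss://".toList) <+: PySem.Chars.lower config.toList := ⟨t, by simp [hch, hlt]⟩
                                    simp only [pysem] at h3
                                    rw [(PySem.Chars.startswith_iff _ _).mpr hpre] at h3
                                    cases h3
                                  have n4 : ("ssr" == String.ofList h) = false := by
                                    simp only [beq_eq_false_iff_ne]; intro he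
                                    have hch : h = ['s','s','r'] := by simpa using congrArg String.toList he.symm
                                    have hpre : ("ssr://".toList) <+: PySem.Chars.lower config.toList := ⟨t, by simp [hch, hlt]⟩
                                    simp only [pysem] at h4
                                    rw [(PySem.Chars.startswith_iff _ _).mpr hpre] at h4
                                    cases h4
                                  have n5 : ("trojan" == String.ofList h) = false := by
                                    simp only [beq_eq_false_iff_ne]; intro he
                                    have hch : h = ['t','r','o','j','a','n'] := by simpa using congrArg String.toList he.symm
                                    have hpre : ("trojan://".toList) <+: PySem.Chars.lower config.toList := ⟨t, by simp [hch, hlt]⟩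
                                    simp only [pysem] at h5
                                    rw [(PySem.Chars.startswith_iff _ _).mpr hpre] at h5
                                    cases h5
                                  have n6 : ("hy2" == String.ofList h) = false := by
                                    simp only [beq_eq_false_iff_ne]; intro he
                                    have hch : h = ['h','y','2'] := by simpa using congrArg String.toList he.symm
                                    have hpre : ("hy2://".toList) <+: PySem.Chars.lower config.toList := ⟨t, by simp [hch, hlt]⟩
                                    simp only [pysem] at h6
                                    rw [(PySem.Chars.startswith_iff _ _).mpr hpre] at h6
                                    cases h6
                                  have n7 : ("hysteria2" == String.ofList h) = false := by
                                    simp only [beq_eq_false_iff_ne]; intro he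
                                    have hch : h = ['h','y','s','t','e','r','i','a','2'] := by simpa using congrArg String.toList he.symm
                                    have hpre : ("hysteria2://".toList) <+: PySem.Chars.lower config.toList := ⟨t, by simp [hch, hlt]⟩
                                    simp only [pysem] at h7
                                    rw [(PySem.Chars.startswith_iff _ _).mpr hpre] at h7
                                    cases h7
                                  have n8 : ("hysteria" == String.ofList h) = false := by
                                    simp only [beq_eq_false_iff_ne]; intro he
                                    have hch : h = ['h','y','s','t','e','r','i','a'] := by simpa using congrArg String.toList he.symm
                                    have hpre : ("hysteria://".toList) <+: PySem.Chars.lower config.toList := ⟨t, by simp [hch, hlt]⟩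
                                    simp only [pysem] at h8
                                    rw [(PySem.Chars.startswith_iff _ _).mpr hpre] at h8
                                    cases h8
                                  have n9 : ("tuic" == String.ofList h) = false := by
                                    simp only [beq_eq_false_iff_ne]; intro he
                                    have hch : h = ['t','u','i','c'] := by simpa using congrArg String.toList he.symm
                                    have hpre : ("tuic://".toList) <+: PySem.Chars.lower config.toList := ⟨t, by simp [hch, hlt]⟩
                                    simp only [pysem] at h9
                                    rw [(PySem.Chars.startswith_iff _ _).mpr hpre] at h9
                                    cases h9
                                  have n10 : ("reality" == String.ofList h) = false := by
                                    simp only [beq_eq_false_iff_ne]; intro he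
                                    have hch : h = ['r','e','a','l','i','t','y'] := by simpa using congrArg String.toList he.symm
                                    have hpre : ("reality://".toList) <+: PySem.Chars.lower config.toList := ⟨t, by simp [hch, hlt]⟩
                                    simp only [pysem] at h10
                                    rw [(PySem.Chars.startswith_iff _ _).mpr hpre] at h10
                                    cases h10
                                  have n11 : ("naive" == String.ofList h) = false := by
                                    simp only [beq_eq_false_iff_ne]; intro he
                                    have hch : h = ['n','a','i','v','e'] := by simpa using congrArg String.toList he.symm
                                    have hpre : ("naive://".toList) <+: PySem.Chars.lower config.toList := ⟨t, by simp [hch, hlt]⟩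
                                    simp only [pysem] at h11
                                    rw [(PySem.Chars.startswith_iff _ _).mpr hpre] at h11
                                    cases h11
                                  have n12 : ("juicity" == String.ofList h) = false := by
                                    simp only [beq_eq_false_iff_ne]; intro he
                                    have hch : h = ['j','u','i','c','i','t','y'] := by simpa using congrArg String.toList he.symm
                                    have hpre : ("juicity://".toList) <+: PySem.Chars.lower config.toList := ⟨t, by simp [hch, hlt]⟩
                                    simp only [pysem] at h12
                                    rw [(PySem.Chars.startswith_iff _ _).mpr hpre] at h12
                                    cases h12
                                  have n13 : ("wireguard" == String.ofList h) = false := by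
                                    simp only [beq_eq_false_iff_ne]; intro he
                                    have hch : h = ['w','i','r','e','g','u','a','r','d'] := by simpa using congrArg String.toList he.symm
                                    have hpre : ("wireguard://".toList) <+: PySem.Chars.lower config.toList := ⟨t, by simp [hch, hlt]⟩
                                    simp only [pysem] at h13
                                    rw [(PySem.Chars.startswith_iff _ _).mpr hpre] at h13
                                    cases h13
                                  have n14 : ("shadowtls" == String.ofList h) = false := by
                                    simp only [beq_eq_false_iff_ne]; intro he
                                    have hch : h = ['s','h','a','d','o','w','t','l','s'] := by simpa using congrArg String.toList he.symm
                                    have hpre : ("shadowtls://".toList) <+: PySem.Chars.lower config.toList := ⟨t, by simp [hch, hlt]⟩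
                                    simp only [pysem] at h14
                                    rw [(PySem.Chars.startswith_iff _ _).mpr hpre] at h14
                                    cases h14
                                  have n15 : ("brook" == String.ofList h) = false := by
                                    simp only [beq_eq_false_iff_ne]; intro he
                                    have hch : h = ['b','r','o','o','k'] := by simpa using congrArg String.toList he.symm
                                    have hpre : ("brook://".toList) <+: PySem.Chars.lower config.toList := ⟨t, by simp [hch, hlt]⟩
                                    simp only [pysem] at h15
                                    rw [(PySem.Chars.startswith_iff _ _).mpr hpre] at h15
                                    cases h15
                                  simp [pvSchemeMap, PySem.Dict.getD_eq_get?_getD, PySem.Dict.get?,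
                                    n1, n2, n3, n4, n5, n6, n7, n8, n9, n10, n11, n12, n13, n14, n15]
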